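-- pv_equiv track=rewrite | github.com/H-Q-Q/TestTasks | TestTasks/task1/main.py | circular_array_path
-- ===== SOURCE A (Python) =====
-- def circular_array_path(n, m):
--     # Создание массива
--     circular_array = list(range(1, n + 1))
--
--     # Создание переменных для записи и отслеживания пути
--     path = []
--     start_index = 0
--
--     while True:
--         # Добавление стартового элемента в начало массива пути
--         path.append(circular_array[start_index])
--
--         # Вычисление нового "стартового" индекса
--         start_index = (start_index + m - 1) % n
--
--         # Выход из цикла если вернулись на начальный элемент
--         if start_index == 0:
--             break
--
--     return path
-- ===== SOURCE B (Python) =====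
-- def circular_array_path(n, m):
--     # Closed form: the visited indices are 0, s, 2s, ... (mod n) with s = (m-1) % n,
--     # and the walk returns to 0 after exactly n // gcd(s, n) steps.
--     s = (m - 1) % n
--     if s == 0:
--         return [1]
--     a, b = s, n
--     while b:
--         a, b = b, a % b
--     k = n // a
--     return [i * s % n + 1 for i in range(k)]
-- ===== Notes on version B (the rewrite author's own statement) =====
-- stated objective: faster
-- what changed: B replaces A's build-the-length-n-array-and-simulate loop by a closed form: it computes the step s=(m-1)%n and the cycle length k=n//gcd(s,n) with Euclid's algorithm, then emits the k visited values i*s%n+1 directly by a comprehension, never materialising the n-element array.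
import Mathlib
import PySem

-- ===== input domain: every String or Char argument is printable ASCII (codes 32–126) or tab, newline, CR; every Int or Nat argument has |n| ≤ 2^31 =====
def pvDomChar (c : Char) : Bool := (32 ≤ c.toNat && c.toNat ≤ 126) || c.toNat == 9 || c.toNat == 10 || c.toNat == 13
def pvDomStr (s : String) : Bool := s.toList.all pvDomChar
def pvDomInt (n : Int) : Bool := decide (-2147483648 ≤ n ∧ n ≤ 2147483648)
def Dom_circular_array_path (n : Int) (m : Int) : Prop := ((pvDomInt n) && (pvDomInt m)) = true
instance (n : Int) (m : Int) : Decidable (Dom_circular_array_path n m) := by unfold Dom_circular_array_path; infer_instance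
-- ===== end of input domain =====

-- B replaces A's build-the-length-n-array-and-simulate loop by a closed form (step s=(m-1)%n,
-- cycle length n//gcd(s,n), values i*s%n+1); equal on every n ≥ 1 (A raises for n ≤ 0).


-- ===== PORT A =====
-- A's while-loop: append circular_array[idx], idx := (idx + m - 1) % n, stop when idx = 0.
-- Fuel n.toNat is a totality guard only: the loop runs at most n iterations (proved below).
def pvLoopA (arr : List Int) (n m : Int) : Nat → Int → List Int → List Int
  | 0, _, path => path
  | fuel+1, idx, path =>
    match PySem.List.pyGet? arr idx with
    | none => path   -- IndexError (unreachable for n ≥ 1)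
    | some v =>
      let path2 := path ++ [v]
      let idx2 := PySem.Int.mod (idx + m - 1) n
      if idx2 = 0 then path2 else pvLoopA arr n m fuel idx2 path2

def circular_array_path (n : Int) (m : Int) : List Int :=
  pvLoopA (PySem.List.pyRange 1 (n+1) 1) n m n.toNat 0 []

-- ===== PORT B =====
-- Source B's Euclid loop `while b: a, b = b, a % b` (Python's %, sign of the divisor)
def pvGcdI (a b : Int) : Int :=
  if _h : b = 0 then a else pvGcdI b (PySem.Int.mod a b)
termination_by b.natAbs
decreasing_by
  rcases lt_or_gt_of_ne _h with hb | hb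
  · have := PySem.Int.mod_neg_bounds (a := a) hb
    omega
  · have h1 := PySem.Int.mod_nonneg a hb
    have h2 := PySem.Int.mod_lt a hb
    omega

-- Source B: s = (m-1) % n; if s == 0: [1]; else k = n // gcd; [i*s % n + 1 for i in range(k)]
def circular_array_path_alt (n : Int) (m : Int) : List Int :=
  if PySem.Int.mod (m - 1) n = 0 then [1]
  else
    (List.range (PySem.Int.floordiv n (pvGcdI (PySem.Int.mod (m - 1) n) n)).toNat).map
      (fun (i : Nat) => PySem.Int.mod ((i : Int) * PySem.Int.mod (m - 1) n) n + 1)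

-- ===== PRECONDITION & SPEC =====
-- A raises for every n ≤ 0 (IndexError on the empty array, ZeroDivisionError for n = 0).
def Pre_circular_array_path (n : Int) (m : Int) : Prop := 1 ≤ n
instance (n : Int) (m : Int) : Decidable (Pre_circular_array_path n m) := by unfold Pre_circular_array_path; infer_instance
def pvWitness_circular_array_path : Int × Int := (5, 3)

def Spec_circular_array_path (n : Int) (m : Int) (out : List Int) : Prop := out = circular_array_path_alt n m
instance (n : Int) (m : Int) (out : List Int) : Decidable (Spec_circular_array_path n m out) := by unfold Spec_circular_array_path; infer_instance

-- ===== CLAIM (what is proved, stated in full; the proofs are below) =====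
def Claim_equal_circular_array_path : Prop := ∀ (n : Int) (m : Int), Dom_circular_array_path n m → Pre_circular_array_path n m → Spec_circular_array_path n m (circular_array_path n m)

-- ===== LEMMAS AND PROOFS =====

lemma pvGcdI_nat : ∀ (b a : Nat), pvGcdI (a : Int) (b : Int) = (Nat.gcd a b : Int) := by
  intro b
  induction b using Nat.strong_induction_on with
  | _ b ih =>
    intro a
    match b with
    | 0 => rw [pvGcdI]; simp
    | b+1 =>
      have hb' : ((b+1 : Nat) : Int) ≠ 0 := by exact_mod_cast Nat.succ_ne_zero b
      rw [pvGcdI, dif_neg hb', PySem.Int.mod_natCast a (b+1),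
          ih (a % (b+1)) (Nat.mod_lt _ (Nat.succ_pos b)) (b+1)]
      exact congrArg _ (by rw [Nat.gcd_comm (b+1) (a % (b+1)), ← Nat.gcd_rec, Nat.gcd_comm])

-- j*s ≡ 0 (mod N) iff the cycle length N / gcd(s,N) divides j
lemma key_dvd (s N : Nat) (hN : 0 < N) (j : Nat) :
    (j * s) % N = 0 ↔ (N / Nat.gcd s N) ∣ j := by
  have hg : 0 < Nat.gcd s N := Nat.gcd_pos_of_pos_right s hN
  have hgs : Nat.gcd s N ∣ s := Nat.gcd_dvd_left s N
  have hgN : Nat.gcd s N ∣ N := Nat.gcd_dvd_right s N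
  have hco : Nat.Coprime (s / Nat.gcd s N) (N / Nat.gcd s N) :=
    Nat.coprime_div_gcd_div_gcd hg
  rw [← Nat.dvd_iff_mod_eq_zero]
  constructor
  · intro hdvd
    have h1 : (N / Nat.gcd s N) * Nat.gcd s N ∣ (j * (s / Nat.gcd s N)) * Nat.gcd s N := by
      rw [Nat.div_mul_cancel hgN, mul_assoc, Nat.div_mul_cancel hgs]
      exact hdvd
    have h2 : (N / Nat.gcd s N) ∣ j * (s / Nat.gcd s N) :=
      (Nat.mul_dvd_mul_iff_right hg).mp h1
    exact Nat.Coprime.dvd_of_dvd_mul_right hco.symm h2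
  · rintro ⟨t, rfl⟩
    refine ⟨t * (s / Nat.gcd s N), ?_⟩
    calc N / Nat.gcd s N * t * s
        = N / Nat.gcd s N * t * (Nat.gcd s N * (s / Nat.gcd s N)) := by
          rw [Nat.mul_div_cancel' hgs]
      _ = (N / Nat.gcd s N * Nat.gcd s N) * (t * (s / Nat.gcd s N)) := by ring
      _ = N * (t * (s / Nat.gcd s N)) := by rw [Nat.div_mul_cancel hgN]

-- one loop step maps index ↑((t*s)%N) to ↑(((t+1)*s)%N)
lemma step_mod (n m : Int) (s N : Nat) (hn : n = (N : Int)) (hN : 0 < N)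
    (hs : PySem.Int.mod (m - 1) n = (s : Int)) (t : Nat) :
    PySem.Int.mod ((((t * s) % N : Nat) : Int) + m - 1) n = ((((t+1) * s) % N : Nat) : Int) := by
  have hpos : (0:Int) < n := by rw [hn]; exact_mod_cast hN
  rw [PySem.Int.mod_eq_emod_of_pos hpos] at hs ⊢
  have h1 : ((((t * s) % N : Nat) : Int) + m - 1) = (((t * s) % N : Nat) : Int) + (m - 1) := by ring
  rw [h1, Int.add_emod, hs, hn]
  norm_cast
  rw [Nat.succ_mul, Nat.mod_mod_of_dvd (t*s) dvd_rfl]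
  exact Nat.mod_add_mod _ _ _

-- the array list(range(1, n+1)) holds u+1 at index u
lemma arr_get (n : Int) (N : Nat) (hn : n = (N : Int)) (u : Nat) (h : u < N) :
    PySem.List.pyGet? (PySem.List.pyRange 1 (n+1) 1) ((u:Nat) : Int) = some ((u:Int) + 1) := by
  rw [PySem.List.pyGet?_natCast, PySem.List.getElem?_pyRange_one]
  have h2 : u < (n + 1 - 1).toNat := by omega
  simp [add_comm]
  omega

-- the loop, started at the t-th visited index with enough fuel, appends the remaining values
lemma loop_run (n m : Int) (s N : Nat) (hn : n = (N : Int)) (hN : 0 < N)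
    (hs : PySem.Int.mod (m - 1) n = (s : Int)) (_hsN : s < N) (_hs0 : s ≠ 0) :
    ∀ (c t fuel : Nat) (path : List Int),
      t < N / Nat.gcd s N → c = N / Nat.gcd s N - t → c ≤ fuel →
      pvLoopA (PySem.List.pyRange 1 (n+1) 1) n m fuel (((t * s) % N : Nat) : Int) path
        = path ++ (List.range' t (N / Nat.gcd s N - t)).map
            (fun j => (((j * s) % N : Nat) : Int) + 1) := by
  intro c
  induction c with
  | zero => intro t fuel path ht hc hf; omega
  | succ c ih =>
    intro t fuel path ht hc hf
    obtain ⟨f, rfl⟩ : ∃ f, fuel = f + 1 := ⟨fuel - 1, by omega⟩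
    rw [pvLoopA, arr_get n N hn _ (Nat.mod_lt _ hN)]
    simp only
    rw [step_mod n m s N hn hN hs t]
    by_cases hend : ((((t+1) * s) % N : Nat) : Int) = 0
    · rw [if_pos hend]
      have h0 : ((t+1) * s) % N = 0 := by exact_mod_cast hend
      have hk : t + 1 = N / Nat.gcd s N := by
        have hd := (key_dvd s N hN (t+1)).mp h0
        have := Nat.le_of_dvd (by omega) hd
        omega
      have : N / Nat.gcd s N - t = 1 := by omega
      rw [this]
      simp
    · rw [if_neg hend]
      have h0 : ((t+1) * s) % N ≠ 0 := by
        intro h; exact hend (by exact_mod_cast congrArg (Nat.cast : Nat → Int) h)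
      have ht1 : t + 1 < N / Nat.gcd s N := by
        rcases Nat.lt_or_ge (t+1) (N / Nat.gcd s N) with h | h
        · exact h
        · exfalso
          have : t + 1 = N / Nat.gcd s N := by omega
          exact h0 ((key_dvd s N hN (t+1)).mpr (this ▸ dvd_rfl))
      rw [ih (t+1) f (path ++ [((((t * s) % N : Nat) : Int) + 1)]) ht1 (by omega) (by omega)]
      have hr : N / Nat.gcd s N - t = (N / Nat.gcd s N - (t+1)) + 1 := by omega
      rw [hr, List.range'_succ]
      simp

lemma main_eq (n m : Int) (hpre : 1 ≤ n) :
    circular_array_path n m = circular_array_path_alt n m := by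
  have hN : 0 < n.toNat := by omega
  have hn : n = (n.toNat : Int) := by omega
  have hpos : (0:Int) < n := hpre
  have hs_nonneg : 0 ≤ PySem.Int.mod (m - 1) n := PySem.Int.mod_nonneg _ hpos
  have hs_lt : PySem.Int.mod (m - 1) n < n := PySem.Int.mod_lt _ hpos
  set N := n.toNat with hNdef
  set s := (PySem.Int.mod (m - 1) n).toNat with hsdef
  have hs : PySem.Int.mod (m - 1) n = (s : Int) := by omega
  have hsN : s < N := by omega
  by_cases h0 : s = 0
  · -- step is 0: A breaks after one iteration, B returns [1]
    obtain ⟨N', hN'⟩ : ∃ N', N = N' + 1 := ⟨N - 1, by omega⟩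
    unfold circular_array_path circular_array_path_alt
    rw [← hNdef, hN', pvLoopA]
    have hget := arr_get n N hn 0 (by omega)
    norm_num at hget
    rw [hget]
    simp only
    have hz : PySem.Int.mod (0 + m - 1) n = 0 := by
      rw [show (0:Int) + m - 1 = m - 1 by ring, hs, h0]
      norm_num
    rw [hz]
    have hz2 : PySem.Int.mod (m - 1) n = 0 := by rw [hs, h0]; norm_num
    rw [if_pos rfl, if_pos hz2]
    rfl
  · -- step s ≠ 0: the loop makes exactly N / gcd(s,N) iterations
    have hg : 0 < Nat.gcd s N := Nat.gcd_pos_of_pos_right s hN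
    have hk : 0 < N / Nat.gcd s N :=
      Nat.div_pos (Nat.le_of_dvd hN (Nat.gcd_dvd_right s N)) hg
    have hkN : N / Nat.gcd s N ≤ N := Nat.div_le_self _ _
    have hA : circular_array_path n m
        = (List.range' 0 (N / Nat.gcd s N)).map (fun j => (((j * s) % N : Nat) : Int) + 1) := by
      have := loop_run n m s N hn hN hs hsN h0 (N / Nat.gcd s N) 0 N []
        hk (by omega) (by omega)
      norm_num at this
      unfold circular_array_path
      rw [← hNdef]
      exact this
    rw [hA]
    have hne : ¬ (PySem.Int.mod (m - 1) n = 0) := by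
      rw [hs]; exact_mod_cast h0
    unfold circular_array_path_alt
    have hgcd : pvGcdI ((s : Nat) : Int) n = ((Nat.gcd s N : Nat) : Int) := by
      rw [hn]; exact pvGcdI_nat N s
    have hflo : (PySem.Int.floordiv n (pvGcdI ((s : Nat) : Int) n)).toNat = N / Nat.gcd s N := by
      rw [hgcd, hn, PySem.Int.floordiv_natCast, Int.toNat_natCast]
    rw [if_neg hne, hs, hflo, ← List.range_eq_range']
    apply List.map_congr_left
    intro i hi
    rw [PySem.Int.mod_eq_emod_of_pos hpos, hn]
    push_cast
    ring

-- ===== VERDICT (by name: the statement is the Claim_ definition above) =====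
theorem circular_array_path_spec : Claim_equal_circular_array_path := by
  intro n m _hdom hpre
  unfold Spec_circular_array_path
  exact main_eq n m hpre
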